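-- pv_equiv track=rewrite | github.com/nathantheinventor/solved-problems | CodeForces/Virtual Contest 1202/b.py | solve
-- ===== SOURCE A (Python) =====
-- def solve(x, y, i, j):
--     ans = 20
--     for a in range(10):
--         for b in range(10):
--             if (i + a * x + b * y + x) % 10 == j:
--                 ans = min(ans, a + b)
--             if (i + a * x + b * y + y) % 10 == j:
--                 ans = min(ans, a + b)
--
--     if ans == 20:
--         return -1
--     return ans
-- ===== SOURCE B (Python) =====
-- def solve(x, y, i, j):
--     # Level-by-level BFS over the 10 digit states; answer = (min moves to reach j, at least one move) - 1.
--     visited = set()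
--     frontier = {(i + x) % 10, (i + y) % 10}
--     moves = 1
--     while frontier:
--         if j in frontier:
--             return moves - 1
--         visited |= frontier
--         frontier = {(d + x) % 10 for d in frontier} | {(d + y) % 10 for d in frontier}
--         frontier -= visited
--         moves += 1
--     return -1
-- ===== Notes on version B (the rewrite author's own statement) =====
-- stated objective: alternative
-- what changed: Replaced the 10x10 brute-force grid scan with a running min accumulator by a level-by-level BFS over the 10 digit states (edges d->(d+x)%10 and d->(d+y)%10) that stops at the first level containing the target and returns that level minus 1.
import Mathlib
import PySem

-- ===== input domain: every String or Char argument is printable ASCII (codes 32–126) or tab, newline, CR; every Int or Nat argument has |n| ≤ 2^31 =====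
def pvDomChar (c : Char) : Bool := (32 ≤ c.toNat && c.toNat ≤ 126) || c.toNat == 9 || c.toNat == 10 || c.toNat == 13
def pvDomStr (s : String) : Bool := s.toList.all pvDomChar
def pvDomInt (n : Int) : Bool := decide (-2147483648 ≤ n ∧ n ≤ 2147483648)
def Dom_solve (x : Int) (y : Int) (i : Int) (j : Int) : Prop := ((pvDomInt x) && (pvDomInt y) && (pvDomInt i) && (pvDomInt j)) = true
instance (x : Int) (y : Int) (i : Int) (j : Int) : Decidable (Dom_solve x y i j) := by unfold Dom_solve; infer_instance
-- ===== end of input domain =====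

-- B replaces A's 10×10 brute-force grid scan by a level-by-level BFS over the 10 digit states
-- (first level containing the target gives min moves − 1); equal return values are proved for all inputs.


-- ===== PORT A =====
-- body of A's inner loop: the two 'if … % 10 == j' updates of ans
def stepA (x : Int) (y : Int) (i : Int) (j : Int) (a : Int) (ans : Int) (b : Int) : Int :=
  let ans := if PySem.Int.mod (i + a * x + b * y + x) 10 == j then min ans (a + b) else ans
  if PySem.Int.mod (i + a * x + b * y + y) 10 == j then min ans (a + b) else ans

def solve (x : Int) (y : Int) (i : Int) (j : Int) : Int :=
  let ans : Int := (PySem.List.pyRange 0 10 1).foldl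
    (fun ans a => (PySem.List.pyRange 0 10 1).foldl (stepA x y i j a) ans) 20
  if ans == 20 then -1 else ans

-- ===== PORT B =====
-- the 'while frontier:' loop of Source B. The loop body runs at most 11 times (each non-final
-- iteration strictly grows 'visited', a set of mod-10 residues), so fuel 12 is never exhausted.
def bfsLoop (x : Int) (y : Int) (j : Int) : Nat → PySem.Set Int → PySem.Set Int → Int → Int
  | 0, _, _, _ => -1
  | fuel+1, visited, frontier, moves =>
    if frontier = [] then -1
    else if PySem.Set.contains frontier j then moves - 1
    else
      let visited' := PySem.Set.union visited frontier
      let frontier' := PySem.Set.diff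
        (PySem.Set.union (PySem.Set.ofList (frontier.map (fun d => PySem.Int.mod (d + x) 10)))
          (frontier.map (fun d => PySem.Int.mod (d + y) 10))) visited'
      bfsLoop x y j fuel visited' frontier' (moves + 1)

def solve_alt (x : Int) (y : Int) (i : Int) (j : Int) : Int :=
  bfsLoop x y j 12 PySem.Set.empty
    (PySem.Set.ofList [PySem.Int.mod (i + x) 10, PySem.Int.mod (i + y) 10]) 1

-- ===== PRECONDITION & SPEC =====
def Spec_solve (x : Int) (y : Int) (i : Int) (j : Int) (out : Int) : Prop := out = solve_alt x y i j
instance (x : Int) (y : Int) (i : Int) (j : Int) (out : Int) : Decidable (Spec_solve x y i j out) := by unfold Spec_solve; infer_instance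

-- ===== CLAIM (what is proved, stated in full; the proofs are below) =====
def Claim_equal_solve : Prop := ∀ (x : Int) (y : Int) (i : Int) (j : Int), Dom_solve x y i j → Spec_solve x y i j (solve x y i j)

-- ===== LEMMAS AND PROOFS =====

theorem mod10 (t : Int) : PySem.Int.mod t 10 = t % 10 :=
  PySem.Int.mod_eq_emod_of_pos (by norm_num)

theorem foldl_const {α β : Type} (l : List α) (f : β → α → β) (h : ∀ s a, f s a = s) :
    ∀ init, l.foldl f init = init := by
  induction l with
  | nil => intro init; rfl
  | cons a t ih => intro init; simp only [List.foldl_cons, h]; exact ih init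

theorem foldl_cast_hom {α β γ : Type} (l : List α) (e : β → γ) (g : β → α → β) (f : γ → α → γ)
    (H : ∀ s a, f (e s) a = e (g s a)) : ∀ init, l.foldl f (e init) = e (l.foldl g init) := by
  induction l with
  | nil => intro init; rfl
  | cons a t ih => intro init; simp only [List.foldl_cons, H]; exact ih _

-- ---------- A side: out-of-range target gives -1 ----------

theorem stepA_out (x y i j a ans b : Int) (hj : ¬ (0 ≤ j ∧ j < 10)) :
    stepA x y i j a ans b = ans := by
  unfold stepA
  rw [mod10, mod10]
  have h1 : ((i + a * x + b * y + x) % 10 == j) = false := by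
    simp only [beq_eq_false_iff_ne]; omega
  have h2 : ((i + a * x + b * y + y) % 10 == j) = false := by
    simp only [beq_eq_false_iff_ne]; omega
  rw [h1, h2]
  simp

theorem solve_outJ (x y i j : Int) (hj : ¬ (0 ≤ j ∧ j < 10)) : solve x y i j = -1 := by
  unfold solve
  have h : (PySem.List.pyRange 0 10 1).foldl
      (fun ans a => (PySem.List.pyRange 0 10 1).foldl (stepA x y i j a) ans) 20 = 20 := by
    apply foldl_const
    intro s a
    exact foldl_const _ _ (fun s' b => stepA_out x y i j a s' b hj) s
  rw [h]
  rfl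

-- ---------- A side: shift to (x%10, y%10, i=0, (j-i)%10) ----------

theorem beq_shift (L1 L2 i j : Int) (hj : 0 ≤ j ∧ j < 10) (h : L2 % 10 = (L1 - i) % 10) :
    (L1 % 10 == j) = (L2 % 10 == (j - i) % 10) := by
  apply Bool.eq_iff_iff.mpr
  simp only [beq_iff_eq]
  omega

theorem modeq_shift (a b x y i c : Int) :
    (0 + a * (x % 10) + b * (y % 10) + c % 10) % 10 = ((i + a * x + b * y + c) - i) % 10 := by
  have hx : Int.ModEq 10 (a * (x % 10)) (a * x) :=
    Int.ModEq.mul_left a (Int.emod_emod_of_dvd x dvd_rfl)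
  have hy : Int.ModEq 10 (b * (y % 10)) (b * y) :=
    Int.ModEq.mul_left b (Int.emod_emod_of_dvd y dvd_rfl)
  have hc : Int.ModEq 10 (c % 10) c := Int.emod_emod_of_dvd c dvd_rfl
  have h0 : Int.ModEq 10 (0 : Int) 0 := Int.ModEq.refl 0
  have h : Int.ModEq 10 (0 + a * (x % 10) + b * (y % 10) + c % 10) (0 + a * x + b * y + c) :=
    ((h0.add hx).add hy).add hc
  have he : (i + a * x + b * y + c) - i = 0 + a * x + b * y + c := by ring
  rw [he]
  exact h

theorem stepA_shift (x y i j a : Int) (hj : 0 ≤ j ∧ j < 10) :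
    stepA x y i j a = stepA (x % 10) (y % 10) 0 ((j - i) % 10) a := by
  funext ans b
  unfold stepA
  rw [mod10, mod10, mod10, mod10,
    beq_shift (i + a * x + b * y + x) (0 + a * (x % 10) + b * (y % 10) + x % 10) i j hj
      (modeq_shift a b x y i x),
    beq_shift (i + a * x + b * y + y) (0 + a * (x % 10) + b * (y % 10) + y % 10) i j hj
      (modeq_shift a b x y i y)]

theorem solve_shift (x y i j : Int) (hj : 0 ≤ j ∧ j < 10) :
    solve x y i j = solve (x % 10) (y % 10) 0 ((j - i) % 10) := by
  unfold solve
  have h : (fun (ans a : Int) => (PySem.List.pyRange 0 10 1).foldl (stepA x y i j a) ans)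
      = (fun (ans a : Int) =>
          (PySem.List.pyRange 0 10 1).foldl (stepA (x % 10) (y % 10) 0 ((j - i) % 10) a) ans) := by
    funext ans a
    rw [stepA_shift x y i j a hj]
  rw [h]

-- ---------- A side: Nat mirror (cheap to evaluate in the kernel) ----------

def stepN (X Y D A : Nat) (ans b : Nat) : Nat :=
  let ans := if (0 + A * X + b * Y + X) % 10 == D then (if A + b ≤ ans then A + b else ans) else ans
  if (0 + A * X + b * Y + Y) % 10 == D then (if A + b ≤ ans then A + b else ans) else ans

def solveN (X Y D : Nat) : Int :=
  let ans := (List.range 10).foldl (fun ans a => (List.range 10).foldl (stepN X Y D a) ans) 20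
  if ans == 20 then -1 else (ans : Int)

theorem beq_cast (n m : Nat) : ((n : Int) == (m : Int)) = (n == m) := by
  apply Bool.eq_iff_iff.mpr
  simp only [beq_iff_eq]
  omega

theorem cast_min (s t : Nat) : min ((s : Nat) : Int) (t : Int) = ((if t ≤ s then t else s : Nat) : Int) := by
  rw [min_def]
  split_ifs <;> omega

theorem stepA_castN (X Y D A s b : Nat) :
    stepA (X : Int) (Y : Int) 0 (D : Int) (A : Int) (s : Int) (b : Int) = (stepN X Y D A s b : Int) := by
  unfold stepA stepN
  rw [mod10, mod10]
  have h1 : ((0 : Int) + A * X + b * Y + X) = ((0 + A * X + b * Y + X : Nat) : Int) := by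
    push_cast; ring
  have h2 : ((0 : Int) + A * X + b * Y + Y) = ((0 + A * X + b * Y + Y : Nat) : Int) := by
    push_cast; ring
  have hmc : ∀ n : Nat, ((n : Int) % 10) = ((n % 10 : Nat) : Int) := by intro n; omega
  have hab : ((A : Int) + b) = ((A + b : Nat) : Int) := by push_cast; ring
  rw [h1, h2, hmc, hmc, beq_cast, beq_cast, hab]
  cases hc1 : ((0 + A * X + b * Y + X) % 10 == D) <;>
    cases hc2 : ((0 + A * X + b * Y + Y) % 10 == D) <;>
      simp only [if_true, if_false, Bool.false_eq_true, cast_min]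

theorem pyRange10 : PySem.List.pyRange 0 10 1 = (List.range 10).map (fun k : Nat => (k : Int)) := by
  decide

theorem solve_castN (X Y D : Nat) : solve (X : Int) (Y : Int) 0 (D : Int) = solveN X Y D := by
  unfold solve solveN
  simp only [pyRange10, List.foldl_map]
  have hfold : (List.range 10).foldl
      (fun (s : Int) (a : Nat) => (List.range 10).foldl
        (fun (s' : Int) (b : Nat) => stepA (X : Int) (Y : Int) 0 (D : Int) (a : Int) s' (b : Int)) s)
      (((20 : Nat) : Int))
      = (((List.range 10).foldl (fun ans a => (List.range 10).foldl (stepN X Y D a) ans) 20 : Nat) : Int) := by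
    apply foldl_cast_hom
    intro s a
    apply foldl_cast_hom
    intro s' b
    exact stepA_castN X Y D a s' b
  have h20 : (20 : Int) = ((20 : Nat) : Int) := rfl
  rw [h20, hfold, beq_cast]

-- ---------- B side: reduce x, y, i mod 10 ----------

theorem bfsLoop_mod (x y j : Int) (fuel : Nat) :
    ∀ v f m, bfsLoop x y j fuel v f m = bfsLoop (x % 10) (y % 10) j fuel v f m := by
  induction fuel with
  | zero => intro v f m; rfl
  | succ n ih =>
    intro v f m
    unfold bfsLoop
    have hx : (fun d : Int => PySem.Int.mod (d + x) 10)
        = (fun d : Int => PySem.Int.mod (d + x % 10) 10) := by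
      funext d; rw [mod10, mod10]; omega
    have hy : (fun d : Int => PySem.Int.mod (d + y) 10)
        = (fun d : Int => PySem.Int.mod (d + y % 10) 10) := by
      funext d; rw [mod10, mod10]; omega
    rw [hx, hy]
    split
    · rfl
    · split
      · rfl
      · exact ih _ _ _

theorem solve_alt_mod (x y i j : Int) :
    solve_alt x y i j = solve_alt (x % 10) (y % 10) (i % 10) j := by
  unfold solve_alt
  have h1 : PySem.Int.mod (i + x) 10 = PySem.Int.mod (i % 10 + x % 10) 10 := by
    rw [mod10, mod10]; omega
  have h2 : PySem.Int.mod (i + y) 10 = PySem.Int.mod (i % 10 + y % 10) 10 := by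
    rw [mod10, mod10]; omega
  rw [h1, h2, bfsLoop_mod]

-- ---------- B side: out-of-range target gives -1 ----------

theorem contains_false_of_out {l : List Int} {j : Int} (hj : ¬ (0 ≤ j ∧ j < 10))
    (hl : ∀ e ∈ l, 0 ≤ e ∧ e < 10) : PySem.Set.contains l j = false := by
  rw [← Bool.not_eq_true, PySem.Set.contains_iff]
  intro hm
  exact absurd (hl _ hm) (by omega)

theorem bfsLoop_outJ (x y j : Int) (hj : ¬ (0 ≤ j ∧ j < 10)) (fuel : Nat) :
    ∀ v f m, (∀ e ∈ f, 0 ≤ e ∧ e < 10) → bfsLoop x y j fuel v f m = -1 := by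
  induction fuel with
  | zero => intro v f m _; rfl
  | succ n ih =>
    intro v f m hf
    unfold bfsLoop
    rw [contains_false_of_out hj hf]
    split
    · rfl
    · simp only [Bool.false_eq_true, if_false]
      apply ih
      intro e he
      rw [PySem.Set.mem_diff] at he
      rcases (PySem.Set.mem_union _ _ _).mp he.1 with h1 | h1
      · rcases List.mem_map.mp ((PySem.Set.mem_ofList _ _).mp h1) with ⟨d, _, rfl⟩
        rw [mod10]
        exact ⟨Int.emod_nonneg _ (by norm_num), Int.emod_lt_of_pos _ (by norm_num)⟩
      · rcases List.mem_map.mp h1 with ⟨d, _, rfl⟩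
        rw [mod10]
        exact ⟨Int.emod_nonneg _ (by norm_num), Int.emod_lt_of_pos _ (by norm_num)⟩

theorem solve_alt_outJ (x y i j : Int) (hj : ¬ (0 ≤ j ∧ j < 10)) : solve_alt x y i j = -1 := by
  unfold solve_alt
  apply bfsLoop_outJ x y j hj
  intro e he
  have h2 := (PySem.Set.mem_ofList _ _).mp he
  simp only [List.mem_cons, List.not_mem_nil, or_false] at h2
  rcases h2 with rfl | rfl <;> rw [mod10] <;>
    exact ⟨Int.emod_nonneg _ (by norm_num), Int.emod_lt_of_pos _ (by norm_num)⟩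

-- ---------- B side: shift the start digit to 0 (states renamed by e ↦ (e+c)%10) ----------

theorem contains_map_phi (c : Int) (l : List Int) (t : Int)
    (hl : ∀ e ∈ l, 0 ≤ e ∧ e < 10) (ht : 0 ≤ t ∧ t < 10) :
    PySem.Set.contains (l.map (fun e => (e + c) % 10)) ((t + c) % 10) = PySem.Set.contains l t := by
  apply Bool.eq_iff_iff.mpr
  rw [PySem.Set.contains_iff, PySem.Set.contains_iff]
  constructor
  · intro h
    rcases List.mem_map.mp h with ⟨d, hd, he⟩
    have hdb := hl _ hd
    have : d = t := by omega
    rwa [← this]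
  · intro h
    exact List.mem_map.mpr ⟨t, h, rfl⟩

theorem add_map_phi (c : Int) (s : List Int) (a : Int)
    (hs : ∀ e ∈ s, 0 ≤ e ∧ e < 10) (ha : 0 ≤ a ∧ a < 10) :
    PySem.Set.add (s.map (fun e => (e + c) % 10)) ((a + c) % 10)
      = (PySem.Set.add s a).map (fun e => (e + c) % 10) := by
  unfold PySem.Set.add
  rw [contains_map_phi c s a hs ha]
  split
  · rfl
  · simp

theorem update_map_phi (c : Int) (l : List Int) :
    ∀ s : List Int, (∀ e ∈ s, 0 ≤ e ∧ e < 10) → (∀ e ∈ l, 0 ≤ e ∧ e < 10) →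
    PySem.Set.update (s.map (fun e => (e + c) % 10)) (l.map (fun e => (e + c) % 10))
      = (PySem.Set.update s l).map (fun e => (e + c) % 10) := by
  induction l with
  | nil => intro s _ _; rfl
  | cons a t ih =>
    intro s hs hl
    simp only [List.map_cons]
    unfold PySem.Set.update
    simp only [List.foldl_cons]
    have ha : 0 ≤ a ∧ a < 10 := hl a (by simp)
    rw [add_map_phi c s a hs ha]
    have hsa : ∀ e ∈ PySem.Set.add s a, 0 ≤ e ∧ e < 10 := by
      intro e he
      rcases (PySem.Set.mem_add _ _ _).mp he with h | h
      · exact hs _ h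
      · exact h ▸ ha
    have := ih (PySem.Set.add s a) hsa (fun e he => hl e (by simp [he]))
    unfold PySem.Set.update at this
    exact this

theorem ofList_map_phi (c : Int) (l : List Int) (hl : ∀ e ∈ l, 0 ≤ e ∧ e < 10) :
    PySem.Set.ofList (l.map (fun e => (e + c) % 10))
      = (PySem.Set.ofList l).map (fun e => (e + c) % 10) := by
  have h := update_map_phi c l [] (by intro e he; cases he) hl
  exact h

theorem diff_map_phi (c : Int) (s t : List Int)
    (hs : ∀ e ∈ s, 0 ≤ e ∧ e < 10) (ht : ∀ e ∈ t, 0 ≤ e ∧ e < 10) :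
    PySem.Set.diff (s.map (fun e => (e + c) % 10)) (t.map (fun e => (e + c) % 10))
      = (PySem.Set.diff s t).map (fun e => (e + c) % 10) := by
  unfold PySem.Set.diff
  rw [List.filter_map]
  apply congrArg (List.map (fun e => (e + c) % 10))
  apply List.filter_congr
  intro e he
  simp only [Function.comp_apply]
  rw [contains_map_phi c t e ht (hs e he)]

theorem succ_map_phi (x c : Int) (f : List Int) :
    (f.map (fun e => (e + c) % 10)).map (fun d => PySem.Int.mod (d + x) 10)
      = (f.map (fun d => PySem.Int.mod (d + x) 10)).map (fun e => (e + c) % 10) := by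
  simp only [List.map_map]
  apply List.map_congr_left
  intro e _
  simp only [Function.comp_apply]
  rw [mod10, mod10]
  omega

theorem succ_in_range (x : Int) (f : List Int) :
    ∀ e ∈ f.map (fun d => PySem.Int.mod (d + x) 10), 0 ≤ e ∧ e < 10 := by
  intro e he
  rcases List.mem_map.mp he with ⟨d, _, rfl⟩
  rw [mod10]
  exact ⟨Int.emod_nonneg _ (by norm_num), Int.emod_lt_of_pos _ (by norm_num)⟩

theorem bfsLoop_shift (x y c j : Int) (hj : 0 ≤ j ∧ j < 10) (fuel : Nat) :
    ∀ (v f : PySem.Set Int) (m : Int),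
    (∀ e ∈ v, 0 ≤ e ∧ e < 10) → (∀ e ∈ f, 0 ≤ e ∧ e < 10) →
    bfsLoop x y ((j + c) % 10) fuel (v.map (fun e => (e + c) % 10))
        (f.map (fun e => (e + c) % 10)) m
      = bfsLoop x y j fuel v f m := by
  induction fuel with
  | zero => intro v f m _ _; rfl
  | succ n ih =>
    intro v f m hv hf
    unfold bfsLoop
    by_cases hfe : f = []
    · subst hfe; simp
    · have hfe' : f.map (fun e => (e + c) % 10) ≠ [] := by simpa using hfe
      rw [if_neg hfe', if_neg hfe, contains_map_phi c f j hf hj]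
      cases hc : PySem.Set.contains f j
      · simp only [Bool.false_eq_true, if_false]
        have hsucc_x : ∀ e ∈ f.map (fun d => PySem.Int.mod (d + x) 10), 0 ≤ e ∧ e < 10 :=
          succ_in_range x f
        have hsucc_y : ∀ e ∈ f.map (fun d => PySem.Int.mod (d + y) 10), 0 ≤ e ∧ e < 10 :=
          succ_in_range y f
        have hofl_rng : ∀ e ∈ PySem.Set.ofList (f.map (fun d => PySem.Int.mod (d + x) 10)),
            0 ≤ e ∧ e < 10 := by
          intro e he
          exact hsucc_x e ((PySem.Set.mem_ofList _ _).mp he)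
        have huni_rng : ∀ e ∈ PySem.Set.union
            (PySem.Set.ofList (f.map (fun d => PySem.Int.mod (d + x) 10)))
            (f.map (fun d => PySem.Int.mod (d + y) 10)), 0 ≤ e ∧ e < 10 := by
          intro e he
          rcases (PySem.Set.mem_union _ _ _).mp he with h | h
          · exact hofl_rng e h
          · exact hsucc_y e h
        have hvis_rng : ∀ e ∈ PySem.Set.union v f, 0 ≤ e ∧ e < 10 := by
          intro e he
          rcases (PySem.Set.mem_union _ _ _).mp he with h | h
          · exact hv e h
          · exact hf e h
        have h1 : PySem.Set.union (v.map (fun e => (e + c) % 10)) (f.map (fun e => (e + c) % 10))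
            = (PySem.Set.union v f).map (fun e => (e + c) % 10) :=
          update_map_phi c f v hv hf
        have h2 : PySem.Set.ofList ((f.map (fun e => (e + c) % 10)).map
              (fun d => PySem.Int.mod (d + x) 10))
            = (PySem.Set.ofList (f.map (fun d => PySem.Int.mod (d + x) 10))).map
              (fun e => (e + c) % 10) := by
          rw [succ_map_phi x c f]
          exact ofList_map_phi c _ (succ_in_range x f)
        have h3 : (f.map (fun e => (e + c) % 10)).map (fun d => PySem.Int.mod (d + y) 10)
            = (f.map (fun d => PySem.Int.mod (d + y) 10)).map (fun e => (e + c) % 10) :=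
          succ_map_phi y c f
        have h4 : PySem.Set.union
            ((PySem.Set.ofList (f.map (fun d => PySem.Int.mod (d + x) 10))).map
              (fun e => (e + c) % 10))
            ((f.map (fun d => PySem.Int.mod (d + y) 10)).map (fun e => (e + c) % 10))
            = (PySem.Set.union (PySem.Set.ofList (f.map (fun d => PySem.Int.mod (d + x) 10)))
                (f.map (fun d => PySem.Int.mod (d + y) 10))).map (fun e => (e + c) % 10) :=
          update_map_phi c _ _ hofl_rng hsucc_y
        have h5 : PySem.Set.diff
            ((PySem.Set.union (PySem.Set.ofList (f.map (fun d => PySem.Int.mod (d + x) 10)))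
                (f.map (fun d => PySem.Int.mod (d + y) 10))).map (fun e => (e + c) % 10))
            ((PySem.Set.union v f).map (fun e => (e + c) % 10))
            = (PySem.Set.diff (PySem.Set.union (PySem.Set.ofList
                (f.map (fun d => PySem.Int.mod (d + x) 10)))
                (f.map (fun d => PySem.Int.mod (d + y) 10))) (PySem.Set.union v f)).map
              (fun e => (e + c) % 10) :=
          diff_map_phi c _ _ huni_rng hvis_rng
        rw [h1, h2, h3, h4, h5]
        apply ih
        · exact hvis_rng
        · intro e he
          rw [PySem.Set.mem_diff] at he
          exact huni_rng e he.1
      · rfl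

theorem solve_alt_shift (x y i j : Int) (hj : 0 ≤ j ∧ j < 10) :
    solve_alt x y i j = solve_alt x y 0 ((j - i) % 10) := by
  unfold solve_alt
  have hfr : ∀ e ∈ ([PySem.Int.mod (i + x) 10, PySem.Int.mod (i + y) 10] : List Int),
      0 ≤ e ∧ e < 10 := by
    intro e he
    simp only [List.mem_cons, List.not_mem_nil, or_false] at he
    rcases he with rfl | rfl <;> rw [mod10] <;>
      exact ⟨Int.emod_nonneg _ (by norm_num), Int.emod_lt_of_pos _ (by norm_num)⟩
  have hofr : ∀ e ∈ PySem.Set.ofList [PySem.Int.mod (i + x) 10, PySem.Int.mod (i + y) 10],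
      0 ≤ e ∧ e < 10 := by
    intro e he
    exact hfr e ((PySem.Set.mem_ofList _ _).mp he)
  have hs := bfsLoop_shift x y (-i) j hj 12 PySem.Set.empty
    (PySem.Set.ofList [PySem.Int.mod (i + x) 10, PySem.Int.mod (i + y) 10]) 1
    (by intro e he; cases he) hofr
  have hjc : (j + -i) % 10 = (j - i) % 10 := by omega
  rw [hjc] at hs
  have hmap : (PySem.Set.ofList [PySem.Int.mod (i + x) 10, PySem.Int.mod (i + y) 10]).map
      (fun e => (e + -i) % 10)
      = PySem.Set.ofList [PySem.Int.mod (0 + x) 10, PySem.Int.mod (0 + y) 10] := by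
    rw [← ofList_map_phi (-i) _ hfr]
    have e1 : (PySem.Int.mod (i + x) 10 + -i) % 10 = PySem.Int.mod (0 + x) 10 := by
      rw [mod10, mod10]; omega
    have e2 : (PySem.Int.mod (i + y) 10 + -i) % 10 = PySem.Int.mod (0 + y) 10 := by
      rw [mod10, mod10]; omega
    simp only [List.map_cons, List.map_nil, e1, e2]
  rw [hmap] at hs
  exact hs.symm

-- ---------- the finite check over residues ----------

set_option maxRecDepth 1000000 in
set_option maxHeartbeats 4000000 in
theorem key0 : ∀ Y ∈ List.range 10, ∀ D ∈ List.range 10,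
    solveN 0 Y D = solve_alt ((0 : Nat) : Int) (Y : Int) 0 (D : Int) := by
  decide

set_option maxRecDepth 1000000 in
set_option maxHeartbeats 4000000 in
theorem key1 : ∀ Y ∈ List.range 10, ∀ D ∈ List.range 10,
    solveN 1 Y D = solve_alt ((1 : Nat) : Int) (Y : Int) 0 (D : Int) := by
  decide

set_option maxRecDepth 1000000 in
set_option maxHeartbeats 4000000 in
theorem key2 : ∀ Y ∈ List.range 10, ∀ D ∈ List.range 10,
    solveN 2 Y D = solve_alt ((2 : Nat) : Int) (Y : Int) 0 (D : Int) := by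
  decide

set_option maxRecDepth 1000000 in
set_option maxHeartbeats 4000000 in
theorem key3 : ∀ Y ∈ List.range 10, ∀ D ∈ List.range 10,
    solveN 3 Y D = solve_alt ((3 : Nat) : Int) (Y : Int) 0 (D : Int) := by
  decide

set_option maxRecDepth 1000000 in
set_option maxHeartbeats 4000000 in
theorem key4 : ∀ Y ∈ List.range 10, ∀ D ∈ List.range 10,
    solveN 4 Y D = solve_alt ((4 : Nat) : Int) (Y : Int) 0 (D : Int) := by
  decide

set_option maxRecDepth 1000000 in
set_option maxHeartbeats 4000000 in
theorem key5 : ∀ Y ∈ List.range 10, ∀ D ∈ List.range 10,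
    solveN 5 Y D = solve_alt ((5 : Nat) : Int) (Y : Int) 0 (D : Int) := by
  decide

set_option maxRecDepth 1000000 in
set_option maxHeartbeats 4000000 in
theorem key6 : ∀ Y ∈ List.range 10, ∀ D ∈ List.range 10,
    solveN 6 Y D = solve_alt ((6 : Nat) : Int) (Y : Int) 0 (D : Int) := by
  decide

set_option maxRecDepth 1000000 in
set_option maxHeartbeats 4000000 in
theorem key7 : ∀ Y ∈ List.range 10, ∀ D ∈ List.range 10,
    solveN 7 Y D = solve_alt ((7 : Nat) : Int) (Y : Int) 0 (D : Int) := by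
  decide

set_option maxRecDepth 1000000 in
set_option maxHeartbeats 4000000 in
theorem key8 : ∀ Y ∈ List.range 10, ∀ D ∈ List.range 10,
    solveN 8 Y D = solve_alt ((8 : Nat) : Int) (Y : Int) 0 (D : Int) := by
  decide

set_option maxRecDepth 1000000 in
set_option maxHeartbeats 4000000 in
theorem key9 : ∀ Y ∈ List.range 10, ∀ D ∈ List.range 10,
    solveN 9 Y D = solve_alt ((9 : Nat) : Int) (Y : Int) 0 (D : Int) := by
  decide

theorem key (X Y D : Nat) (hX : X < 10) (hY : Y < 10) (hD : D < 10) :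
    solveN X Y D = solve_alt (X : Int) (Y : Int) 0 (D : Int) := by
  have hY' := List.mem_range.mpr hY
  have hD' := List.mem_range.mpr hD
  interval_cases X
  · exact key0 Y hY' D hD'
  · exact key1 Y hY' D hD'
  · exact key2 Y hY' D hD'
  · exact key3 Y hY' D hD'
  · exact key4 Y hY' D hD'
  · exact key5 Y hY' D hD'
  · exact key6 Y hY' D hD'
  · exact key7 Y hY' D hD'
  · exact key8 Y hY' D hD'
  · exact key9 Y hY' D hD'

-- ===== VERDICT (by name: the statement is the Claim_ definition above) =====
theorem solve_spec : Claim_equal_solve := by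
  intro x y i j _
  unfold Spec_solve
  by_cases hj : 0 ≤ j ∧ j < 10
  · have hA : solve x y i j = solveN (x % 10).toNat (y % 10).toNat ((j - i) % 10).toNat := by
      rw [solve_shift x y i j hj]
      have hx : (((x % 10).toNat : Nat) : Int) = x % 10 := by omega
      have hy : (((y % 10).toNat : Nat) : Int) = y % 10 := by omega
      have hd : ((((j - i) % 10).toNat : Nat) : Int) = (j - i) % 10 := by omega
      rw [← hx, ← hy, ← hd, solve_castN]
      simp only [Int.toNat_natCast]
    have hB : solve_alt x y i j = solve_alt ((x % 10 : Int)) ((y % 10 : Int)) 0 ((j - i) % 10) := by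
      rw [solve_alt_mod x y i j, solve_alt_shift (x % 10) (y % 10) (i % 10) j hj]
      have : (j - i % 10) % 10 = (j - i) % 10 := by omega
      rw [this]
    rw [hA, hB]
    have hx : (((x % 10).toNat : Nat) : Int) = x % 10 := by omega
    have hy : (((y % 10).toNat : Nat) : Int) = y % 10 := by omega
    have hd : ((((j - i) % 10).toNat : Nat) : Int) = (j - i) % 10 := by omega
    rw [← hx, ← hy, ← hd]
    exact key _ _ _ (by omega) (by omega) (by omega)
  · rw [solve_outJ x y i j hj, solve_alt_outJ x y i j hj]
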